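-- pv_equiv track=rewrite | github.com/yagizdoner/GTU-Cources | CSE - 321 - Algoritma Tasarımı/HW3/141044062.py | part1
-- ===== SOURCE A (Python) =====
-- def part1(boxes,iteration): # in which Iteration
--     if len(boxes) > 1:
--         if iteration % 2 == 0 : # even
--             boxes[1:len(boxes)-1] = part1(boxes[1:len(boxes)-1],iteration+1)
--         elif iteration % 2 == 1 :
--             boxes[0],boxes[len(boxes)-1] = boxes[len(boxes)-1],boxes[0] # first and last boxes changed.
--             boxes[1:len(boxes)-1] = part1(boxes[1:len(boxes)-1],iteration+1)
--     return boxes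
-- ===== SOURCE B (Python) =====
-- def part1(boxes, iteration):  # single O(n) pass: swap pair (k, n-1-k) when (iteration+k) is odd
--     n = len(boxes)
--     for k in range(n // 2):
--         if (iteration + k) % 2 == 1:
--             boxes[k], boxes[n - 1 - k] = boxes[n - 1 - k], boxes[k]
--     return boxes
-- ===== Notes on version B (the rewrite author's own statement) =====
-- stated objective: faster
-- what changed: Replaced the peel-the-outer-pair recursion (each level copies slices of the list) by a single loop that swaps the pair (k, n-1-k) exactly when iteration+k is odd.
import Mathlib
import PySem

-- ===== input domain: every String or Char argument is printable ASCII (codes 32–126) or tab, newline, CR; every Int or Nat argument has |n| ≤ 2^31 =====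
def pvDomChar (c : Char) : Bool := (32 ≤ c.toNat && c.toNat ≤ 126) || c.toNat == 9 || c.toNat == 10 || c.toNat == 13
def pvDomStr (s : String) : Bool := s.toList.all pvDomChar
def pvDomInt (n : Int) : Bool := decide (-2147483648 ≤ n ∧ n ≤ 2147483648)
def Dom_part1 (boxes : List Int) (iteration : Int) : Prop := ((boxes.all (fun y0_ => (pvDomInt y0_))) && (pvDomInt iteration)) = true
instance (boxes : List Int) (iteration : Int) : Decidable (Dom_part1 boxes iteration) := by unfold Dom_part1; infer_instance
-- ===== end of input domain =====

-- B replaces A's O(n^2) peel-the-outer-pair recursion (each level copies slices) by a single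
-- O(n) loop swapping the pair (k, n-1-k) exactly when iteration+k is odd.
-- A mutates its argument in place via slice assignment and B performs the same in-place swaps;
-- the equivalence proved here is about the return value.

-- ===== PORT A =====
-- boxes[1:len(boxes)-1] on a list of length ≥ 1 is exactly (boxes.drop 1).dropLast;
-- boxes[0] / boxes[len(boxes)-1] are headI / getD (len-1) (in range since len > 1).
def part1 (boxes : List Int) (iteration : Int) : List Int :=
  if _h : boxes.length > 1 then
    if iteration % 2 == 0 then
      boxes.headI :: part1 ((boxes.drop 1).dropLast) (iteration + 1) ++ [boxes.getD (boxes.length - 1) 0]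
    else if iteration % 2 == 1 then
      -- first and last boxes changed, then recurse on the middle
      boxes.getD (boxes.length - 1) 0 :: part1 ((boxes.drop 1).dropLast) (iteration + 1) ++ [boxes.headI]
    else boxes
  else boxes
termination_by boxes.length
decreasing_by all_goals (simp [List.length_dropLast, List.length_drop]; omega)

-- ===== PORT B =====
-- one loop step: res[k], res[n-1-k] = res[n-1-k], res[k] when (iteration+k) % 2 == 1
def swapStep (n : Nat) (iteration : Int) (res : List Int) (k : Nat) : List Int :=
  if (iteration + (k : Int)) % 2 == 1 then
    (res.set k (res.getD (n - 1 - k) 0)).set (n - 1 - k) (res.getD k 0)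
  else res

def part1_alt (boxes : List Int) (iteration : Int) : List Int :=
  (List.range (boxes.length / 2)).foldl (swapStep boxes.length iteration) boxes

-- ===== PRECONDITION & SPEC =====
def Spec_part1 (boxes : List Int) (iteration : Int) (out : List Int) : Prop := out = part1_alt boxes iteration
instance (boxes : List Int) (iteration : Int) (out : List Int) : Decidable (Spec_part1 boxes iteration out) := by unfold Spec_part1; infer_instance

-- ===== CLAIM (what is proved, stated in full; the proofs are below) =====
def Claim_equal_part1 : Prop := ∀ (boxes : List Int) (iteration : Int), Dom_part1 boxes iteration → Spec_part1 boxes iteration (part1 boxes iteration)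

-- ===== LEMMAS AND PROOFS =====

lemma swapStep_length (n : Nat) (it : Int) (res : List Int) (k : Nat) :
    (swapStep n it res k).length = res.length := by
  unfold swapStep; split <;> simp

lemma getD_concat_length (xs : List Int) (b d : Int) : (xs ++ [b]).getD xs.length d = b := by
  simp [List.getD_eq_getElem?_getD]

lemma getD_concat_lt (xs : List Int) (b d : Int) (i : Nat) (h : i < xs.length) :
    (xs ++ [b]).getD i d = xs.getD i d := by
  simp [List.getD_eq_getElem?_getD, List.getElem?_append_left h]

lemma set_concat_lt (xs : List Int) (b v : Int) (i : Nat) (h : i < xs.length) :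
    (xs ++ [b]).set i v = xs.set i v ++ [b] := by
  rw [List.set_append_left _ _ h]

-- one interior step: index k+1 in a :: xs ++ [b] is the step k on xs with iteration+1
lemma swapStep_inner (xs : List Int) (a b : Int) (it : Int) (k : Nat) (hk : k < xs.length / 2) :
    swapStep (xs.length + 2) it (a :: xs ++ [b]) (k + 1)
      = a :: swapStep xs.length (it + 1) xs k ++ [b] := by
  have hk1 : k < xs.length := by omega
  have hk2 : xs.length - 1 - k < xs.length := by omega
  have hidx : xs.length + 2 - 1 - (k + 1) = (xs.length - 1 - k) + 1 := by omega
  have hcond : (it + ((k : Nat) + 1 : Int)) % 2 = ((it + 1) + (k : Int)) % 2 := by ring_nf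
  unfold swapStep
  push_cast
  rw [hcond]
  split
  · have hidx2 : xs.length - k = (xs.length - 1 - k) + 1 := by omega
    rw [hidx2]
    simp only [List.cons_append, List.getD_cons_succ, List.set_cons_succ]
    rw [getD_concat_lt xs b 0 k hk1, getD_concat_lt xs b 0 _ hk2,
        set_concat_lt xs b _ k hk1, set_concat_lt _ b _ _ (by simpa using hk2)]
  · rfl

lemma foldl_inner (it : Int) (L : List Nat) :
    ∀ (xs : List Int) (a b : Int), (∀ k ∈ L, k < xs.length / 2) →
    L.foldl (fun res k => swapStep (xs.length + 2) it res (k + 1)) (a :: xs ++ [b])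
      = a :: L.foldl (swapStep xs.length (it + 1)) xs ++ [b] := by
  induction L with
  | nil => intro xs a b _; rfl
  | cons k L ih =>
    intro xs a b hL
    have hk : k < xs.length / 2 := hL k (by simp)
    simp only [List.foldl_cons]
    rw [swapStep_inner xs a b it k hk]
    have hlen : (swapStep xs.length (it + 1) xs k).length = xs.length :=
      swapStep_length _ _ _ _
    have := ih (swapStep xs.length (it + 1) xs k) a b
      (by intro m hm; rw [hlen]; exact hL m (by simp [hm]))
    rw [hlen] at this
    exact this

-- the closed recurrence satisfied by part1_alt on lists of length ≥ 2
lemma part1_alt_rec (xs : List Int) (a b : Int) (it : Int) :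
    part1_alt (a :: xs ++ [b]) it
      = (if it % 2 == 0 then a else b) :: part1_alt xs (it + 1)
          ++ [if it % 2 == 0 then b else a] := by
  unfold part1_alt
  have hlen : (a :: xs ++ [b]).length = xs.length + 2 := by simp
  have hdiv : (xs.length + 2) / 2 = xs.length / 2 + 1 := by omega
  rw [hlen, hdiv, List.range_succ_eq_map, List.foldl_cons, List.foldl_map]
  have hstep0 : swapStep (xs.length + 2) it (a :: xs ++ [b]) 0
      = (if it % 2 == 0 then a else b) :: xs ++ [if it % 2 == 0 then b else a] := by
    have hmod : it % 2 = 0 ∨ it % 2 = 1 := by omega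
    unfold swapStep
    have hidx : xs.length + 2 - 1 - 0 = xs.length + 1 := by omega
    rw [hidx]
    simp only [Int.natCast_zero, add_zero, List.getD_cons_zero, List.getD_cons_succ,
      List.set_cons_zero, List.set_cons_succ]
    rcases hmod with h | h <;> simp [h, getD_concat_length, List.set_append_right,
      List.length_set]
  rw [hstep0]
  have := foldl_inner it (List.range (xs.length / 2))
    xs (if it % 2 == 0 then a else b) (if it % 2 == 0 then b else a)
    (by intro k hk; simpa using hk)
  -- the successor-index fold over the unchanged interior xs
  simpa using this

lemma decomp (boxes : List Int) (h : boxes.length > 1) :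
    ∃ a xs b, boxes = a :: xs ++ [b] := by
  cases boxes with
  | nil => simp at h
  | cons a rest =>
    have hne : rest ≠ [] := by intro hr; simp [hr] at h
    exact ⟨a, rest.dropLast, rest.getLast hne, by
      rw [List.cons_append, List.dropLast_append_getLast hne]⟩

lemma part1_alt_short (boxes : List Int) (it : Int) (h : ¬ boxes.length > 1) :
    part1_alt boxes it = boxes := by
  have : boxes.length / 2 = 0 := by omega
  simp [part1_alt, this]

lemma part1_eq_alt : ∀ (n : Nat) (boxes : List Int), boxes.length = n →
    ∀ it, part1 boxes it = part1_alt boxes it := by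
  intro n
  induction n using Nat.strong_induction_on with
  | _ n ih =>
    intro boxes hlen it
    by_cases h : boxes.length > 1
    · obtain ⟨a, xs, b, rfl⟩ := decomp boxes h
      have hxs : (a :: xs ++ [b]).length = xs.length + 2 := by simp
      have hmid : (((a :: xs ++ [b]).drop 1).dropLast) = xs := by
        simp [List.dropLast_concat]
      have hfst : (a :: xs ++ [b]).headI = a := rfl
      have hlst : (a :: xs ++ [b]).getD ((a :: xs ++ [b]).length - 1) 0 = b := by
        rw [hxs]
        show (a :: (xs ++ [b])).getD (xs.length + 1) 0 = b
        rw [List.getD_cons_succ, getD_concat_length]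
      have hih := ih xs.length (by omega) xs rfl (it + 1)
      have hmod : it % 2 = 0 ∨ it % 2 = 1 := by omega
      rw [part1, part1_alt_rec]
      rcases hmod with hm | hm <;>
        simp [h, hm, hmid, hfst, hlst, hih]
    · rw [part1, part1_alt_short boxes it h]
      simp [h]

-- ===== VERDICT (by name: the statement is the Claim_ definition above) =====
theorem part1_spec : Claim_equal_part1 := by
  intro boxes iteration _
  exact part1_eq_alt boxes.length boxes rfl iteration
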